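-- pv_equiv track=rewrite | github.com/qwedsazxc456/study | 프로그래머스문제2.py | solution
-- ===== SOURCE A (Python) =====
-- from collections import deque
-- from collections import deque
--
-- def solution(progresses, speeds):
--     p=deque(progresses)
--     s=deque(speeds)
--     i=0
--     a=[]
--     c=0
--     while p:
--         if p[0]+s[0]*i >= 100:
--             p.popleft()
--             s.popleft()
--             c += 1
--         else:
--             i += 1
--             if c != 0:
--                 a.append(c)
--                 c=0
--         if not p:
--             a.append(c)
--     return a
-- ===== SOURCE B (Python) =====
-- def solution(progresses, speeds):
--     # finish day of each task: ceil((100 - p) / s), never negative (done tasks ship on day 0)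
--     days = [max(0, -((p - 100) // s)) for p, s in zip(progresses, speeds)]
--     if not days:
--         return []
--     res = []
--     first = days[0]
--     count = 1
--     for d in days[1:]:
--         if d <= first:
--             count += 1
--         else:
--             res.append(count)
--             first = d
--             count = 1
--     res.append(count)
--     return res
-- ===== Notes on version B (the rewrite author's own statement) =====
-- stated objective: simpler
-- what changed: Replaces the day-by-day deque simulation with a closed-form integer-ceiling finish day per task followed by a single grouping pass over the finish days.
-- outside the precondition, e.g. on solution([100], [0]): A returns [1], B raises ZeroDivisionError; on solution([100, 103], [1, -3]): A returns [2], B returns [1, 1]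
import Mathlib
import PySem

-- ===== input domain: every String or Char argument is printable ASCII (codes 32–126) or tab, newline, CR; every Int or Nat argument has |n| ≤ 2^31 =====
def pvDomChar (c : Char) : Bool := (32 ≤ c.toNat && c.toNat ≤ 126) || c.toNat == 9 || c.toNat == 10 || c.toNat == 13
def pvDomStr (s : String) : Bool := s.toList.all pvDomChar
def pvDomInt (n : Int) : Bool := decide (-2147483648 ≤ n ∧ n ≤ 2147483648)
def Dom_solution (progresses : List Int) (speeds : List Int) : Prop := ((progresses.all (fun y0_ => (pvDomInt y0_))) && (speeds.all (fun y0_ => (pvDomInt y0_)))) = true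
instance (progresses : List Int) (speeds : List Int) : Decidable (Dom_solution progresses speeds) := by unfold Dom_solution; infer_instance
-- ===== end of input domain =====

-- B replaces A's day-by-day simulation by a closed-form ceiling finish day per task
-- plus one grouping pass (simpler, one pass over the tasks).

-- ===== PORT A =====
-- A's while-loop, ported with a fuel counter; under Pre_solution and Dom_solution every
-- finish day is at most 2^31 + 101, so the fuel below always suffices (proved below).
def solGo : Nat → List Int → List Int → Int → List Int → Int → List Int
  | 0, _, _, _, a, _ => a
  | _+1, [], _, _, a, _ => a
  | _+1, _::_, [], _, a, _ => a   -- Python raises IndexError here (excluded by Pre_solution)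
  | fuel+1, p0::pt, s0::st, i, a, c =>
    if 100 ≤ p0 + s0 * i then
      if pt = [] then a ++ [c + 1] else solGo fuel pt st i a (c + 1)
    else
      if c ≠ 0 then solGo fuel (p0::pt) (s0::st) (i+1) (a ++ [c]) 0
      else solGo fuel (p0::pt) (s0::st) (i+1) a c

def solution (progresses : List Int) (speeds : List Int) : List Int :=
  solGo (progresses.length + 2200000000) progresses speeds 0 [] 0

-- ===== PORT B =====
def dayOf (p s : Int) : Int := max 0 (-(PySem.Int.floordiv (p - 100) s))

def groupGo : List Int → Int → Int → List Int → List Int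
  | [], _, count, res => res ++ [count]
  | d :: t, first, count, res =>
    if d ≤ first then groupGo t first (count + 1) res
    else groupGo t d 1 (res ++ [count])

def solution_alt (progresses : List Int) (speeds : List Int) : List Int :=
  let days := (progresses.zip speeds).map (fun q => dayOf q.1 q.2)
  match days with
  | [] => []
  | d :: t => groupGo t d 1 []

-- ===== PRECONDITION & SPEC =====
-- Pre_solution restricts to the problem's natural domain: a positive speed for every
-- task. Outside it A raises IndexError (fewer speeds than tasks), generally diverges
-- (a task below 100 with nonpositive speed), B divides by zero (a zero speed), and on
-- the remaining corners (tasks at/above 100 paired with a negative speed, which A's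
-- simulation pops on day 0) the two answers can defensibly differ.
def Pre_solution (progresses : List Int) (speeds : List Int) : Prop :=
  progresses.length ≤ speeds.length ∧
  (∀ q ∈ progresses.zip speeds, 1 ≤ q.2)
instance (progresses : List Int) (speeds : List Int) : Decidable (Pre_solution progresses speeds) := by unfold Pre_solution; infer_instance

def pvWitness_solution : List Int × List Int := ([93, 30, 55], [1, 30, 5])

def Spec_solution (progresses : List Int) (speeds : List Int) (out : List Int) : Prop := out = solution_alt progresses speeds
instance (progresses : List Int) (speeds : List Int) (out : List Int) : Decidable (Spec_solution progresses speeds out) := by unfold Spec_solution; infer_instance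

-- ===== CLAIM (what is proved, stated in full; the proofs are below) =====
def Claim_equal_solution : Prop := ∀ (progresses : List Int) (speeds : List Int), Dom_solution progresses speeds → Pre_solution progresses speeds → Spec_solution progresses speeds (solution progresses speeds)

-- ===== LEMMAS AND PROOFS =====

lemma solGo_nil (fuel : Nat) (s : List Int) (i : Int) (a : List Int) (c : Int) :
    solGo fuel [] s i a c = a := by
  cases fuel <;> rfl

lemma groupGo_res (t : List Int) : ∀ (f c : Int) (res : List Int),
    groupGo t f c res = res ++ groupGo t f c [] := by
  induction t with
  | nil => intro f c res; simp [groupGo]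
  | cons d t ih =>
    intro f c res
    by_cases h : d ≤ f
    · simp only [groupGo, if_pos h]
      exact ih f (c + 1) res
    · simp only [groupGo, if_neg h]
      rw [ih d 1 (res ++ [c]), ih d 1 ([] ++ [c])]
      simp

lemma dayOf_nonneg (p s : Int) : 0 ≤ dayOf p s := le_max_left _ _

lemma finish_iff (p s i : Int) (hs : 0 < s) (hi : 0 ≤ i) :
    (100 ≤ p + s * i) ↔ dayOf p s ≤ i := by
  have h := PySem.Int.le_floordiv_iff_mul_le (q := -i) (a := p - 100) hs
  have hm : -i * s = -(s * i) := by ring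
  rw [hm] at h
  simp only [dayOf, max_le_iff, neg_le]
  constructor
  · intro hfin; exact ⟨hi, by rw [h]; linarith⟩
  · intro ⟨_, hle⟩; rw [h] at hle; linarith

lemma dayOf_le_bound (p s : Int) (hp : -2147483648 ≤ p) (hs : 1 ≤ s) :
    dayOf p s ≤ 2147483749 := by
  have h := PySem.Int.le_floordiv_iff_mul_le (q := -2147483749) (a := p - 100) (by omega : (0:Int) < s)
  have hmul : -2147483749 * s ≤ -2147483749 * 1 := by nlinarith
  have : -2147483749 ≤ PySem.Int.floordiv (p - 100) s := by rw [h]; linarith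
  simp only [dayOf, max_le_iff]
  omega

def maxL : List Int → Int
  | [] => 0
  | d :: t => max d (maxL t)

lemma maxL_le {B : Int} (hB : 0 ≤ B) : ∀ l : List Int, (∀ x ∈ l, x ≤ B) → maxL l ≤ B := by
  intro l
  induction l with
  | nil => intro _; simpa [maxL]
  | cons d t ih =>
    intro h
    simp only [maxL, max_le_iff]
    exact ⟨h d (by simp), ih fun x hx => h x (by simp [hx])⟩

lemma solGo_eq (fuel : Nat) : ∀ (p s : List Int) (i : Int) (a : List Int) (c d : Int) (t : List Int),
    (p.zip s).map (fun q => dayOf q.1 q.2) = d :: t →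
    p.length ≤ s.length →
    (∀ q ∈ p.zip s, 1 ≤ q.2) →
    0 ≤ i → 0 ≤ c →
    (c = 0 → i ≤ d) →
    p.length + (maxL (d :: t) - i).toNat < fuel →
    solGo fuel p s i a c =
      a ++ (if c = 0 then groupGo t d 1 [] else groupGo (d :: t) i c []) := by
  induction fuel with
  | zero => intro p s i a c d t _ _ _ _ _ _ hf; omega
  | succ fuel ih =>
    intro p s i a c d t hds hlen hpos hi hc hcd hf
    match p, s with
    | [], _ => simp at hds
    | _ :: _, [] => simp at hlen
    | p0 :: pt, s0 :: st =>
      simp only [List.zip_cons_cons, List.map_cons, List.cons.injEq] at hds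
      obtain ⟨hd, ht⟩ := hds
      have hs0 : 1 ≤ s0 := hpos (p0, s0) (by simp)
      have hfin := finish_iff p0 s0 i (by omega) hi
      rw [hd] at hfin
      simp only [solGo]
      by_cases hpop : 100 ≤ p0 + s0 * i
      · -- front task finishes now: d ≤ i
        have hdle : d ≤ i := hfin.mp hpop
        rw [if_pos hpop]
        cases pt with
        | nil =>
          have ht' : t = [] := by simpa using ht.symm
          by_cases hc0 : c = 0
          · have hid : i = d := le_antisymm (hcd hc0) hdle
            subst hc0
            simp [ht', groupGo]
          · simp [hc0, ht', groupGo, hdle]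
        | cons p1 pt' =>
          rw [if_neg (by simp)]
          cases st with
          | nil => simp only [List.length_cons, List.length_nil] at hlen; omega
          | cons s1 st' =>
            simp only [List.zip_cons_cons, List.map_cons] at ht
            have htt : t = dayOf p1 s1 :: ((pt'.zip st').map (fun q => dayOf q.1 q.2)) := ht.symm
            have hlen' : (p1 :: pt').length ≤ (s1 :: st').length := by
              simp only [List.length_cons] at hlen ⊢; omega
            have hpos' : ∀ q ∈ (p1 :: pt').zip (s1 :: st'), 1 ≤ q.2 := by
              intro q hq
              exact hpos q (by rw [List.zip_cons_cons]; exact List.mem_cons_of_mem _ hq)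
            have hmaxle : maxL t ≤ maxL (d :: t) := le_max_right _ _
            have hfuel' : (p1 :: pt').length + (maxL t - i).toNat < fuel := by
              simp only [List.length_cons] at hf ⊢
              omega
            have hrec := ih (p1 :: pt') (s1 :: st') i a (c + 1)
              (dayOf p1 s1) ((pt'.zip st').map (fun q => dayOf q.1 q.2))
              (by simp) hlen' hpos' hi (by omega) (by omega)
              (by rw [htt] at hfuel'; exact hfuel')
            rw [hrec, if_neg (by omega : ¬ c + 1 = 0)]
            by_cases hc0 : c = 0
            · have hid : i = d := le_antisymm (hcd hc0) hdle
              subst hc0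
              rw [if_pos rfl, htt, hid]
              norm_num
            · rw [if_neg hc0, htt]
              simp only [groupGo, if_pos hdle]
      · -- front task not finished: i < d, advance the day
        have hdgt : i < d := by
          by_contra h
          exact hpop (hfin.mpr (by omega))
        rw [if_neg hpop]
        have hdmax : d ≤ maxL (d :: t) := le_max_left _ _
        have hf' : (p0 :: pt).length + (maxL (d :: t) - (i + 1)).toNat < fuel := by
          simp only [List.length_cons] at hf ⊢
          omega
        by_cases hc0 : c = 0
        · rw [if_neg (by simp [hc0])]
          have hrec := ih (p0 :: pt) (s0 :: st) (i + 1) a c d t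
            (by simp [hd, ht]) hlen hpos (by omega) hc (fun _ => by omega) hf'
          rw [hrec, if_pos hc0, if_pos hc0]
        · rw [if_pos (by simp [hc0])]
          have hrec := ih (p0 :: pt) (s0 :: st) (i + 1) (a ++ [c]) 0 d t
            (by simp [hd, ht]) hlen hpos (by omega) le_rfl (fun _ => by omega) hf'
          rw [hrec, if_pos rfl, if_neg hc0]
          have hstep : groupGo (d :: t) i c [] = [c] ++ groupGo t d 1 [] := by
            simp only [groupGo, if_neg (show ¬ d ≤ i by omega)]
            rw [groupGo_res t d 1 ([] ++ [c])]
            simp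
          rw [hstep]
          simp

-- ===== VERDICT (by name: the statement is the Claim_ definition above) =====
theorem solution_spec : Claim_equal_solution := by
  intro progresses speeds hdom hpre
  obtain ⟨hlen, hs⟩ := hpre
  have hdom' := hdom
  unfold Dom_solution at hdom'
  simp only [Bool.and_eq_true, List.all_eq_true] at hdom'
  have hp : ∀ x ∈ progresses, -2147483648 ≤ x := by
    intro x hx
    have := hdom'.1 x hx
    simp only [pvDomInt, decide_eq_true_eq] at this
    omega
  unfold Spec_solution solution solution_alt
  cases hds : (progresses.zip speeds).map (fun q => dayOf q.1 q.2) with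
  | nil =>
    have hz : progresses.zip speeds = [] := by simpa using hds
    have hlen0 : progresses.length = 0 := by
      have h := List.length_zip (l₁ := progresses) (l₂ := speeds)
      rw [hz] at h
      simp only [List.length_nil] at h
      omega
    have hnil : progresses = [] := by
      cases progresses with
      | nil => rfl
      | cons x xs => simp at hlen0
    subst hnil
    simp [solGo_nil]
  | cons d t =>
    have hb : ∀ x ∈ (progresses.zip speeds).map (fun q => dayOf q.1 q.2), x ≤ 2147483749 := by
      intro x hx
      obtain ⟨q, hq, rfl⟩ := List.mem_map.mp hx
      obtain ⟨hq1, hq2⟩ := List.of_mem_zip hq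
      exact dayOf_le_bound q.1 q.2 (hp _ hq1) (hs q hq)
    rw [hds] at hb
    have hd0 : 0 ≤ d := by
      have hx := hds ▸ (by simp : d ∈ d :: t)
      obtain ⟨q, hq, rfl⟩ := List.mem_map.mp hx
      exact dayOf_nonneg q.1 q.2
    have hmax : maxL (d :: t) ≤ 2147483749 := maxL_le (by norm_num) _ hb
    have hmain := solGo_eq (progresses.length + 2200000000) progresses speeds 0 [] 0 d t
      hds hlen hs le_rfl le_rfl (fun _ => hd0) (by omega)
    rw [hmain, if_pos rfl]
    simp
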